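-- pv_equiv track=rewrite | github.com/isidrolv/react-certification-course | generate_java_questions.py | generate_distractors
-- ===== SOURCE A (Python) =====
-- def generate_distractors(question_text, correct_answer):
--     """Genera opciones incorrectas plausibles"""
--     question_lower = question_text.lower()
--
--     # Distractores generales para diferentes tipos de preguntas
--     general_distractors = [
--         "Esta opción es incorrecta para esta pregunta de Java.",
--         "Esta no es la respuesta correcta según los estándares de Java.",
--         "Esta opción no aplica a este concepto de programación Java."
--     ]
--
--     # Distractores específicos por tema
--     if any(word in question_lower for word in ['jvm', 'platform', 'bytecode']):
--         specific_distractors = [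
--             "Java se compila directamente a código máquina específico de la plataforma.",
--             "Java requiere recompilación para cada sistema operativo diferente.",
--             "Java no puede ejecutarse en diferentes sistemas operativos."
--         ]
--     elif any(word in question_lower for word in ['string', 'immutable']):
--         specific_distractors = [
--             "Los objetos String en Java son completamente mutables.",
--             "StringBuffer y StringBuilder son inmutables en Java.",
--             "Java no tiene soporte para cadenas de texto inmutables."
--         ]
--     elif any(word in question_lower for word in ['wrapper', 'boxing']):
--         specific_distractors = [
--             "Java no soporta conversión automática entre primitivos y objetos.",
--             "Los tipos wrapper consumen menos memoria que los primitivos.",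
--             "Autoboxing solo funciona con tipos numéricos, no con boolean o char."
--         ]
--     elif any(word in question_lower for word in ['collection', 'list', 'set']):
--         specific_distractors = [
--             "Las colecciones en Java solo pueden almacenar tipos primitivos.",
--             "ArrayList y LinkedList tienen el mismo rendimiento en todas las operaciones.",
--             "Set permite elementos duplicados en Java."
--         ]
--     elif any(word in question_lower for word in ['thread', 'synchronized']):
--         specific_distractors = [
--             "Java no soporta programación concurrente nativa.",
--             "Synchronized solo funciona con métodos estáticos.",
--             "Los threads en Java no pueden compartir memoria."
--         ]
--     else:
--         specific_distractors = [
--             "Esta funcionalidad no existe en Java.",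
--             "Java no soporta esta característica hasta versiones muy recientes.",
--             "Esta es una característica exclusiva de otros lenguajes de programación."
--         ]
--
--     # Combinar distractores y seleccionar 3
--     all_distractors = specific_distractors + general_distractors
--
--     # Asegurar que no repetimos la respuesta correcta
--     unique_distractors = [d for d in all_distractors if d != correct_answer]
--
--     # Seleccionar 3 distractores únicos
--     selected_distractors = []
--     for distractor in unique_distractors:
--         if len(selected_distractors) < 3:
--             selected_distractors.append(distractor)
--
--     # Si necesitamos más distractores, generar algunos genéricos
--     while len(selected_distractors) < 3:
--         generic = f"Opción incorrecta número {len(selected_distractors) + 1} para esta pregunta."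
--         selected_distractors.append(generic)
--
--     return selected_distractors[:3]
-- ===== SOURCE B (Python) =====
-- # Different mechanism: a flat keyword->category index scanned once with min() instead of
-- # A's sequential if/elif rule ladder, and a single remove() of the correct answer instead
-- # of A's filter + bounded-append loop + padding + slice.
-- _SPECIFIC = (
--     ["Java se compila directamente a código máquina específico de la plataforma.",
--      "Java requiere recompilación para cada sistema operativo diferente.",
--      "Java no puede ejecutarse en diferentes sistemas operativos."],
--     ["Los objetos String en Java son completamente mutables.",
--      "StringBuffer y StringBuilder son inmutables en Java.",
--      "Java no tiene soporte para cadenas de texto inmutables."],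
--     ["Java no soporta conversión automática entre primitivos y objetos.",
--      "Los tipos wrapper consumen menos memoria que los primitivos.",
--      "Autoboxing solo funciona con tipos numéricos, no con boolean o char."],
--     ["Las colecciones en Java solo pueden almacenar tipos primitivos.",
--      "ArrayList y LinkedList tienen el mismo rendimiento en todas las operaciones.",
--      "Set permite elementos duplicados en Java."],
--     ["Java no soporta programación concurrente nativa.",
--      "Synchronized solo funciona con métodos estáticos.",
--      "Los threads en Java no pueden compartir memoria."],
--     ["Esta funcionalidad no existe en Java.",
--      "Java no soporta esta característica hasta versiones muy recientes.",
--      "Esta es una característica exclusiva de otros lenguajes de programación."],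
-- )
--
-- _GENERAL = [
--     "Esta opción es incorrecta para esta pregunta de Java.",
--     "Esta no es la respuesta correcta según los estándares de Java.",
--     "Esta opción no aplica a este concepto de programación Java.",
-- ]
--
-- # every keyword of a topic maps to the same category number; lower number = higher priority
-- _KEYWORD_CATEGORY = {
--     "jvm": 0, "platform": 0, "bytecode": 0,
--     "string": 1, "immutable": 1,
--     "wrapper": 2, "boxing": 2,
--     "collection": 3, "list": 3, "set": 3,
--     "thread": 4, "synchronized": 4,
-- }
--
--
-- def generate_distractors(question_text, correct_answer):
--     """Genera opciones incorrectas plausibles"""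
--     ql = question_text.lower()
--     cat = min((i for kw, i in _KEYWORD_CATEGORY.items() if kw in ql), default=5)
--     candidates = _SPECIFIC[cat] + _GENERAL
--     if correct_answer in candidates:
--         candidates.remove(correct_answer)
--     return candidates[:3]
-- ===== Notes on version B (the rewrite author's own statement) =====
-- stated objective: alternative
-- what changed: Topic matching is done by a flat keyword->category index reduced with min() over all matching keywords (priority = smallest category) instead of A's sequential if/elif ladder over rule groups, and the correct answer is removed once with remove() instead of A's filter + bounded-append selection loop + padding loop + slice.
import Mathlib
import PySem

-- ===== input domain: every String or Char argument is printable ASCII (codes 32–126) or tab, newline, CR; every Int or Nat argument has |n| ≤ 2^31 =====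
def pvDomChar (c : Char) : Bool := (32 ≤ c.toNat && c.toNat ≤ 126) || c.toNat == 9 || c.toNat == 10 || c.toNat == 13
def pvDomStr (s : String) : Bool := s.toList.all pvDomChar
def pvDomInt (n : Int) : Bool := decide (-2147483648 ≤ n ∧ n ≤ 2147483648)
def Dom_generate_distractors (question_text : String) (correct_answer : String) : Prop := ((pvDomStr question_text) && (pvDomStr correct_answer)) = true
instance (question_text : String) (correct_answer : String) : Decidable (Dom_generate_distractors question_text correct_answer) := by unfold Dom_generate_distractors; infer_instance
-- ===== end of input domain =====

-- B replaces A's if/elif rule ladder by a flat keyword->category index reduced with min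
-- over all matching keywords, and the filter/select/pad/slice machinery by one remove()
-- of the correct answer followed by take 3 (objective: alternative).

-- ===== PORT A =====
-- the `while len(selected) < 3` padding loop of A, literal
def padSelected (sel : List String) : List String :=
  if sel.length < 3 then
    padSelected (sel ++ ["Opción incorrecta número " ++ PySem.Int.toStr ((sel.length : Int) + 1) ++ " para esta pregunta."])
  else sel
termination_by 3 - sel.length

def generate_distractors (question_text : String) (correct_answer : String) : List String :=
  let question_lower := PySem.Str.lower question_text
  let general_distractors := [
    "Esta opción es incorrecta para esta pregunta de Java.",
    "Esta no es la respuesta correcta según los estándares de Java.",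
    "Esta opción no aplica a este concepto de programación Java."]
  let specific_distractors :=
    if ["jvm", "platform", "bytecode"].any (fun word => PySem.Str.isIn word question_lower) then [
      "Java se compila directamente a código máquina específico de la plataforma.",
      "Java requiere recompilación para cada sistema operativo diferente.",
      "Java no puede ejecutarse en diferentes sistemas operativos."]
    else if ["string", "immutable"].any (fun word => PySem.Str.isIn word question_lower) then [
      "Los objetos String en Java son completamente mutables.",
      "StringBuffer y StringBuilder son inmutables en Java.",
      "Java no tiene soporte para cadenas de texto inmutables."]
    else if ["wrapper", "boxing"].any (fun word => PySem.Str.isIn word question_lower) then [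
      "Java no soporta conversión automática entre primitivos y objetos.",
      "Los tipos wrapper consumen menos memoria que los primitivos.",
      "Autoboxing solo funciona con tipos numéricos, no con boolean o char."]
    else if ["collection", "list", "set"].any (fun word => PySem.Str.isIn word question_lower) then [
      "Las colecciones en Java solo pueden almacenar tipos primitivos.",
      "ArrayList y LinkedList tienen el mismo rendimiento en todas las operaciones.",
      "Set permite elementos duplicados en Java."]
    else if ["thread", "synchronized"].any (fun word => PySem.Str.isIn word question_lower) then [
      "Java no soporta programación concurrente nativa.",
      "Synchronized solo funciona con métodos estáticos.",
      "Los threads en Java no pueden compartir memoria."]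
    else [
      "Esta funcionalidad no existe en Java.",
      "Java no soporta esta característica hasta versiones muy recientes.",
      "Esta es una característica exclusiva de otros lenguajes de programación."]
  let all_distractors := specific_distractors ++ general_distractors
  let unique_distractors := all_distractors.filter (fun d => d != correct_answer)
  let selected_distractors :=
    unique_distractors.foldl (fun sel d => if sel.length < 3 then sel ++ [d] else sel) []
  let selected_distractors := padSelected selected_distractors
  PySem.List.slice selected_distractors none (some 3)

-- ===== PORT B =====
-- _SPECIFIC: six candidate lists, index 5 is the default topic
def bSpecific : List (List String) := [
  ["Java se compila directamente a código máquina específico de la plataforma.",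
   "Java requiere recompilación para cada sistema operativo diferente.",
   "Java no puede ejecutarse en diferentes sistemas operativos."],
  ["Los objetos String en Java son completamente mutables.",
   "StringBuffer y StringBuilder son inmutables en Java.",
   "Java no tiene soporte para cadenas de texto inmutables."],
  ["Java no soporta conversión automática entre primitivos y objetos.",
   "Los tipos wrapper consumen menos memoria que los primitivos.",
   "Autoboxing solo funciona con tipos numéricos, no con boolean o char."],
  ["Las colecciones en Java solo pueden almacenar tipos primitivos.",
   "ArrayList y LinkedList tienen el mismo rendimiento en todas las operaciones.",
   "Set permite elementos duplicados en Java."],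
  ["Java no soporta programación concurrente nativa.",
   "Synchronized solo funciona con métodos estáticos.",
   "Los threads en Java no pueden compartir memoria."],
  ["Esta funcionalidad no existe en Java.",
   "Java no soporta esta característica hasta versiones muy recientes.",
   "Esta es una característica exclusiva de otros lenguajes de programación."]]

def bGeneral : List String := [
  "Esta opción es incorrecta para esta pregunta de Java.",
  "Esta no es la respuesta correcta según los estándares de Java.",
  "Esta opción no aplica a este concepto de programación Java."]

-- _KEYWORD_CATEGORY as an association list in insertion order
def bKeywordCat : List (String × Nat) := [
  ("jvm", 0), ("platform", 0), ("bytecode", 0),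
  ("string", 1), ("immutable", 1),
  ("wrapper", 2), ("boxing", 2),
  ("collection", 3), ("list", 3), ("set", 3),
  ("thread", 4), ("synchronized", 4)]

def generate_distractors_alt (question_text : String) (correct_answer : String) : List String :=
  let ql := PySem.Str.lower question_text
  -- min((i for kw, i in _KEYWORD_CATEGORY.items() if kw in ql), default=5)
  let matching := bKeywordCat.filterMap (fun p => if PySem.Str.isIn p.1 ql then some p.2 else none)
  let cat := matching.foldl min 5
  let candidates := bSpecific.getD cat [] ++ bGeneral
  -- if correct_answer in candidates: candidates.remove(correct_answer)
  let candidates := if candidates.contains correct_answer then candidates.erase correct_answer else candidates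
  candidates.take 3

-- ===== PRECONDITION & SPEC =====
def Spec_generate_distractors (question_text : String) (correct_answer : String) (out : List String) : Prop := out = generate_distractors_alt question_text correct_answer
instance (question_text : String) (correct_answer : String) (out : List String) : Decidable (Spec_generate_distractors question_text correct_answer out) := by unfold Spec_generate_distractors; infer_instance

-- ===== CLAIM =====
def Claim_equal_generate_distractors : Prop := ∀ (question_text : String) (correct_answer : String), Dom_generate_distractors question_text correct_answer → Spec_generate_distractors question_text correct_answer (generate_distractors question_text correct_answer)

-- ===== LEMMAS AND PROOFS =====

-- A's selection loop appends while fewer than 3 are selected: it takes the first 3.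
lemma foldl_select (l : List String) (acc : List String) (h : acc.length ≤ 3) :
    l.foldl (fun sel d => if sel.length < 3 then sel ++ [d] else sel) acc
      = acc ++ l.take (3 - acc.length) := by
  induction l generalizing acc with
  | nil => simp
  | cons d t ih =>
    by_cases hlt : acc.length < 3
    · have h3 : 3 - acc.length = (3 - (acc.length + 1)) + 1 := by omega
      simp only [List.foldl_cons, if_pos hlt]
      rw [ih (acc ++ [d]) (by simp; omega)]
      simp [h3, List.take_succ_cons, List.append_assoc]
    · have h3 : acc.length = 3 := by omega
      simp only [List.foldl_cons, if_neg hlt]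
      rw [ih acc h]
      simp [h3]

-- the padding loop is a no-op once 3 are selected
lemma padSelected_of_full (sel : List String) (h : ¬ sel.length < 3) : padSelected sel = sel := by
  rw [padSelected, if_neg h]

-- a filter over distinct elements removes at most one of them
lemma filter_ne_length (l : List String) (c : String) (h : l.Nodup) :
    l.length ≤ (l.filter (fun d => d != c)).length + 1 := by
  induction l with
  | nil => simp
  | cons a t ih =>
    rcases List.nodup_cons.mp h with ⟨ha, ht⟩
    by_cases hac : a = c
    · have : t.filter (fun d => d != c) = t :=
        List.filter_eq_self.mpr (fun x hx => by
          simp only [bne_iff_ne, ne_eq]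
          intro hxc; apply ha; rwa [hac, ← hxc])
      simp [hac, this]
    · simpa [List.filter_cons, hac] using Nat.succ_le_succ (ih ht)

-- slice ys [:3] = take 3
lemma slice_take3 (ys : List String) : PySem.List.slice ys none (some 3) = ys.take 3 := by
  simpa using PySem.List.slice_to_natCast (xs := ys) (b := 3)

-- A's filter → select → pad → slice pipeline equals filter-then-take-3
lemma a_pipeline (ys : List String) (c : String) (hnd : ys.Nodup) (hlen : ys.length = 6) :
    PySem.List.slice
      (padSelected ((ys.filter (fun d => d != c)).foldl
        (fun sel d => if sel.length < 3 then sel ++ [d] else sel) []))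
      none (some 3)
    = (ys.filter (fun d => d != c)).take 3 := by
  set ud := ys.filter (fun d => d != c) with hud
  have hge : 3 ≤ ud.length := by
    have h1 := filter_ne_length ys c hnd
    rw [← hud] at h1
    omega
  have hsel : ud.foldl (fun sel d => if sel.length < 3 then sel ++ [d] else sel) []
      = ud.take 3 := by
    simpa using foldl_select ud [] (by simp)
  rw [hsel]
  have hl3 : (ud.take 3).length = 3 := by
    simp [List.length_take]; omega
  rw [padSelected_of_full _ (by omega), slice_take3]
  simp

-- when the correct answer is absent, A's filter keeps everything
lemma not_contains_filter (l : List String) (c : String) (h : ¬ l.contains c = true) :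
    l.filter (fun d => d != c) = l := by
  apply List.filter_eq_self.mpr
  intro x hx
  simp only [bne_iff_ne, ne_eq]
  intro he
  exact h (List.contains_iff_mem.mpr (he ▸ hx))

-- min-folding one keyword group (all keywords carry the same category i)
lemma foldl_min_group (kws : List String) (i a : Nat) (ql : String) :
    ((kws.map (fun k => (k, i))).filterMap
        (fun p => if PySem.Str.isIn p.1 ql then some p.2 else none)).foldl min a
      = if kws.any (fun k => PySem.Str.isIn k ql) then min a i else a := by
  induction kws generalizing a with
  | nil => simp
  | cons k t ih =>
    cases h : PySem.Str.isIn k ql with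
    | true =>
      simp only [List.map_cons, List.filterMap_cons, h, if_true, List.foldl_cons, List.any_cons,
        Bool.true_or]
      rw [ih]
      have hmm : min (min a i) i = min a i := by rw [Nat.min_assoc, Nat.min_self]
      split_ifs
      · exact hmm
      · rfl
    | false =>
      simp only [List.map_cons, List.filterMap_cons, h, Bool.false_eq_true, if_false,
        List.any_cons, Bool.false_or]
      exact ih a

-- the min over all matching keywords is the first matching category (5 = default)
lemma cat_eq (ql : String) :
    (bKeywordCat.filterMap
        (fun p => if PySem.Str.isIn p.1 ql then some p.2 else none)).foldl min 5
      = (if ["jvm", "platform", "bytecode"].any (fun word => PySem.Str.isIn word ql) then 0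
         else if ["string", "immutable"].any (fun word => PySem.Str.isIn word ql) then 1
         else if ["wrapper", "boxing"].any (fun word => PySem.Str.isIn word ql) then 2
         else if ["collection", "list", "set"].any (fun word => PySem.Str.isIn word ql) then 3
         else if ["thread", "synchronized"].any (fun word => PySem.Str.isIn word ql) then 4
         else 5) := by
  have hkw : bKeywordCat =
      (["jvm", "platform", "bytecode"].map (fun k => (k, 0)))
      ++ (["string", "immutable"].map (fun k => (k, 1)))
      ++ (["wrapper", "boxing"].map (fun k => (k, 2)))
      ++ (["collection", "list", "set"].map (fun k => (k, 3)))
      ++ (["thread", "synchronized"].map (fun k => (k, 4))) := by rfl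
  rw [hkw]
  simp only [List.filterMap_append, List.foldl_append]
  rw [foldl_min_group, foldl_min_group, foldl_min_group, foldl_min_group, foldl_min_group]
  split_ifs <;> decide

-- pushing the computed category through the table lookup
lemma getD_if5 (p0 p1 p2 p3 p4 : Prop) [Decidable p0] [Decidable p1] [Decidable p2]
    [Decidable p3] [Decidable p4] :
    bSpecific.getD (if p0 then 0 else if p1 then 1 else if p2 then 2
      else if p3 then 3 else if p4 then 4 else 5) []
    = (if p0 then
        ["Java se compila directamente a código máquina específico de la plataforma.",
         "Java requiere recompilación para cada sistema operativo diferente.",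
         "Java no puede ejecutarse en diferentes sistemas operativos."]
      else if p1 then
        ["Los objetos String en Java son completamente mutables.",
         "StringBuffer y StringBuilder son inmutables en Java.",
         "Java no tiene soporte para cadenas de texto inmutables."]
      else if p2 then
        ["Java no soporta conversión automática entre primitivos y objetos.",
         "Los tipos wrapper consumen menos memoria que los primitivos.",
         "Autoboxing solo funciona con tipos numéricos, no con boolean o char."]
      else if p3 then
        ["Las colecciones en Java solo pueden almacenar tipos primitivos.",
         "ArrayList y LinkedList tienen el mismo rendimiento en todas las operaciones.",
         "Set permite elementos duplicados en Java."]
      else if p4 then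
        ["Java no soporta programación concurrente nativa.",
         "Synchronized solo funciona con métodos estáticos.",
         "Los threads en Java no pueden compartir memoria."]
      else
        ["Esta funcionalidad no existe en Java.",
         "Java no soporta esta característica hasta versiones muy recientes.",
         "Esta es una característica exclusiva de otros lenguajes de programación."]) := by
  split_ifs <;> rfl

-- ===== VERDICT =====
theorem generate_distractors_spec : Claim_equal_generate_distractors := by
  intro q c _
  unfold Spec_generate_distractors
  dsimp only [generate_distractors, generate_distractors_alt]
  rw [cat_eq, getD_if5]
  simp only [bGeneral]
  split_ifs <;>
    rw [a_pipeline _ c (by decide) (by decide)] <;>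
    first
      | rw [List.Nodup.erase_eq_filter (by decide)]
      | rw [not_contains_filter _ c (by assumption)]
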